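-- pv_equiv track=rewrite | github.com/ffinguMac/BOJ | 백준/Silver/1652. 누울 자리를 찾아라/누울 자리를 찾아라.py | count_horizontal
-- ===== SOURCE A (Python) =====
-- def count_horizontal(room, n):
--   cnt = 0
--   for i in range(n):
--     consecutive = 0
--     for j in range(n):
--       if room[i][j] == '.':
--         consecutive += 1
--         if consecutive == 2:
--           cnt += 1
--       else:
--         consecutive = 0
--   return cnt
-- ===== SOURCE B (Python) =====
-- def count_horizontal(room, n):
--     # Group-and-count: a spot is counted once per maximal horizontal run of '.'
--     # of length >= 2 inside the n x n prefix of the grid.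
--     if n <= 0:
--         return 0
--     total = 0
--     for row in room[:n]:
--         s = ''.join(c if c == '.' else ' ' for c in row[:n])
--         total += sum(1 for run in s.split() if len(run) >= 2)
--     return total
-- ===== Notes on version B (the rewrite author's own statement) =====
-- stated objective: idiomatic
-- what changed: Instead of threading a running consecutive-counter with an ==2 trigger per cell, B slices the grid to its n x n prefix, masks non-'.' cells to spaces, splits each row into maximal runs of '.', and counts the runs of length >= 2.
import Mathlib
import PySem

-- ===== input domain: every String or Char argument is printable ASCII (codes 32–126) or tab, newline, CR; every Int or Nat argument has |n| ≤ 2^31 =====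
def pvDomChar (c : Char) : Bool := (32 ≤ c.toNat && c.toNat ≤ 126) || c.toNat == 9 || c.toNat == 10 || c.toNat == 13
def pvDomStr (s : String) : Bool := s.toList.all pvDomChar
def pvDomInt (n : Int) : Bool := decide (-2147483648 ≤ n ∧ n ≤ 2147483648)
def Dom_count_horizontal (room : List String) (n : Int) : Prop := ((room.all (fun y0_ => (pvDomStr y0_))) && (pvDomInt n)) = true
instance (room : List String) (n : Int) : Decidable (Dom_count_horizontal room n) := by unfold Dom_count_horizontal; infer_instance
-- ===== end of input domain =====

-- B replaces A's per-cell consecutive-counter with slicing to the n×n prefix, masking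
-- non-'.' cells to spaces and counting whitespace-split maximal '.'-runs of length ≥ 2 (idiomatic grouping).

-- ===== PORT A =====
-- literal port of A's nested index loops; the `none` branch is Python's IndexError path, excluded by Pre_
def count_horizontal (room : List String) (n : Int) : Int :=
  (PySem.List.pyRange 0 n 1).foldl (fun cnt i =>
    ((PySem.List.pyRange 0 n 1).foldl (fun (s : Int × Int) j =>
        match (PySem.List.pyGet? room i).bind (fun row => PySem.Str.pyGet? row j) with
        | some c =>
            if c = '.' then
              let consecutive := s.2 + 1
              if consecutive = 2 then (s.1 + 1, consecutive) else (s.1, consecutive)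
            else (s.1, 0)
        | none => s)  -- IndexError in Python: outside Pre_
      (cnt, 0)).1) 0

-- ===== PORT B =====
-- port of Source B: slice to the n×n prefix, mask non-'.' to ' ', whitespace-split, count runs of length ≥ 2
def count_horizontal_alt (room : List String) (n : Int) : Int :=
  if n ≤ 0 then 0
  else
    (PySem.List.slice room none (some n)).foldl (fun total row =>
      let s : List Char :=
        (PySem.Str.slice row none (some n)).toList.map (fun c => if c = '.' then c else ' ')
      total + ((PySem.Chars.split₀ s).map
                (fun run => if 2 ≤ run.length then (1 : Int) else 0)).sum) 0

-- ===== PRECONDITION & SPEC =====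
-- Pre_ excludes exactly the inputs on which A raises IndexError: fewer than n rows,
-- or one of the first n rows shorter than n.
def Pre_count_horizontal (room : List String) (n : Int) : Prop :=
  n ≤ (room.length : Int) ∧ ∀ r ∈ room.take n.toNat, n ≤ (r.toList.length : Int)
instance (room : List String) (n : Int) : Decidable (Pre_count_horizontal room n) := by
  unfold Pre_count_horizontal; infer_instance
def pvWitness_count_horizontal : List String × Int := (["..x.", "....", "x...", "...."], 4)

def Spec_count_horizontal (room : List String) (n : Int) (out : Int) : Prop := out = count_horizontal_alt room n
instance (room : List String) (n : Int) (out : Int) : Decidable (Spec_count_horizontal room n out) := by unfold Spec_count_horizontal; infer_instance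

-- ===== CLAIM (what is proved, stated in full; the proofs are below) =====
def Claim_equal_count_horizontal : Prop := ∀ (room : List String) (n : Int), Dom_count_horizontal room n → Pre_count_horizontal room n → Spec_count_horizontal room n (count_horizontal room n)

-- ===== LEMMAS AND PROOFS =====

-- A's inner-loop step on one character
def pvStep (s : Int × Int) (c : Char) : Int × Int :=
  if c = '.' then
    let consecutive := s.2 + 1
    if consecutive = 2 then (s.1 + 1, consecutive) else (s.1, consecutive)
  else (s.1, 0)

-- reference count: number of times a '.'-run reaches exactly length 2, starting with k consecutive dots
def pvRuns2 : List Char → Int → Int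
  | [], _ => 0
  | c :: t, k => if c = '.' then (if k + 1 = 2 then 1 else 0) + pvRuns2 t (k + 1) else pvRuns2 t 0

-- an index loop 'for i in range(k): … l[i] …' is a fold over the first k elements
theorem pvFoldl_pyRange_get {α β : Type} (l : List α) (k : Nat) (hk : k ≤ l.length)
    (F : Option α → β → β) (init : β) :
    (PySem.List.pyRange 0 (k : Int) 1).foldl (fun acc i => F (PySem.List.pyGet? l i) acc) init
      = (l.take k).foldl (fun acc x => F (some x) acc) init := by
  induction k generalizing init with
  | zero => simp [PySem.List.pyRange]
  | succ m ih =>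
      have hm : m < l.length := hk
      have : ((m : Int) + 1) = ((m + 1 : Nat) : Int) := by push_cast; ring
      rw [← this, PySem.List.pyRange_one_succ_right (by positivity)]
      rw [List.foldl_append, ih (Nat.le_of_lt hm)]
      simp only [PySem.List.pyGet?_natCast, List.getElem?_eq_getElem hm, List.foldl_cons,
        List.foldl_nil]
      rw [List.take_add_one, List.getElem?_eq_getElem hm]
      simp only [Option.toList_some, List.foldl_append, List.foldl_cons, List.foldl_nil]

-- A's inner loop equals pvRuns2
theorem pvFoldl_step_runs2 (m : List Char) : ∀ (c0 k : Int),
    (m.foldl pvStep (c0, k)).1 = c0 + pvRuns2 m k := by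
  induction m with
  | nil => intro c0 k; simp [pvRuns2]
  | cons c t ih =>
      intro c0 k
      by_cases hc : c = '.'
      · by_cases h2 : k + 1 = 2 <;>
          simp [pvStep, pvRuns2, hc, h2, ih, add_assoc]
      · simp [pvStep, pvRuns2, hc, ih]

-- B's split-and-count equals pvRuns2, via the go-accumulator invariant
theorem pvGo_invariant (m : List Char) : ∀ (cur : List Char) (acc : List (List Char)),
    ((PySem.Chars.split₀.go (m.map (fun c => if c = '.' then c else ' ')) cur acc).countP
        (fun run => 2 ≤ run.length) : Int)
      = (acc.countP (fun run => 2 ≤ run.length) : Int)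
        + (if 2 ≤ cur.length then 1 else 0) + pvRuns2 m (cur.length : Int) := by
  induction m with
  | nil =>
      intro cur acc
      simp only [List.map_nil, pvRuns2]
      by_cases hcur : cur = []
      · simp [hcur, PySem.Chars.split₀.go]
      · have he : cur.isEmpty = false := by simp [hcur]
        simp only [PySem.Chars.split₀.go, he, Bool.false_eq_true, reduceIte]
        rw [List.countP_reverse, List.countP_cons]
        push_cast
        simp only [decide_eq_true_eq, List.length_reverse]
        split_ifs with h2 <;> omega
  | cons c t ih =>
      intro cur acc
      by_cases hc : c = '.'
      · subst hc
        have hmap : List.map (fun c => if c = '.' then c else ' ') ('.' :: t)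
            = '.' :: List.map (fun c => if c = '.' then c else ' ') t := by simp
        rw [hmap]
        have hns : ¬ (PySem.Chars.isspace '.' = true) := by decide
        simp only [PySem.Chars.split₀.go, if_neg hns]
        rw [ih ('.' :: cur) acc]
        simp only [List.length_cons, pvRuns2]
        push_cast
        split_ifs <;> omega
      · have hmap : List.map (fun c => if c = '.' then c else ' ') (c :: t)
            = ' ' :: List.map (fun c => if c = '.' then c else ' ') t := by simp [hc]
        rw [hmap]
        have hs : PySem.Chars.isspace ' ' = true := by decide
        simp only [PySem.Chars.split₀.go, if_pos hs]
        by_cases hcur : cur = []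
        · simp only [hcur, List.isEmpty_nil, reduceIte]
          rw [ih [] acc]
          simp [pvRuns2, hc]
        · have he : cur.isEmpty = false := by simp [hcur]
          simp only [he, Bool.false_eq_true, reduceIte]
          rw [ih [] (cur.reverse :: acc)]
          simp only [List.countP_cons, List.length_nil, pvRuns2, if_neg hc]
          push_cast
          simp only [decide_eq_true_eq, List.length_reverse]
          split_ifs with h2 <;> omega

theorem pvRowCount (row : List Char) :
    ((PySem.Chars.split₀ (row.map (fun c => if c = '.' then c else ' '))).map
        (fun run => if 2 ≤ run.length then (1 : Int) else 0)).sum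
      = pvRuns2 row 0 := by
  have hfun : (fun run : List Char => if 2 ≤ run.length then (1 : Int) else 0)
      = fun run => if (fun r : List Char => decide (2 ≤ r.length)) run = true then 1 else 0 := by
    funext run; simp
  rw [hfun, PySem.List.sum_map_ite_one_zero]
  have := pvGo_invariant row [] []
  simpa [PySem.Chars.split₀] using this

-- ===== VERDICT (by name: the statement is the Claim_ definition above) =====
theorem count_horizontal_spec : Claim_equal_count_horizontal := by
  intro room n _ hpre
  unfold Spec_count_horizontal count_horizontal count_horizontal_alt
  obtain ⟨hlen, hrow⟩ := hpre
  by_cases hn : n ≤ 0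
  · have : PySem.List.pyRange 0 n 1 = [] := by
      simp [PySem.List.pyRange]; omega
    simp [this, hn]
  · rw [not_le] at hn
    rw [if_neg (by omega)]
    have hk : n = ((n.toNat : Nat) : Int) := by omega
    set k : Nat := n.toNat with hkdef
    have hkl : k ≤ room.length := by omega
    rw [PySem.List.slice_to _ (by omega : (0:Int) ≤ n)]
    -- outer loops on both sides become folds over room.take k
    rw [hk, pvFoldl_pyRange_get room k hkl
      (F := fun o cnt => ((PySem.List.pyRange 0 ((k : Nat) : Int) 1).foldl (fun (s : Int × Int) j =>
        match o.bind (fun row => PySem.Str.pyGet? row j) with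
        | some c =>
            if c = '.' then
              let consecutive := s.2 + 1
              if consecutive = 2 then (s.1 + 1, consecutive) else (s.1, consecutive)
            else (s.1, 0)
        | none => s) (cnt, 0)).1)]
    -- pointwise equality of the two row bodies
    apply PySem.List.foldl_congr_mem
    intro acc row hmem
    have hrl : k ≤ row.toList.length := by
      have := hrow row hmem; omega
    -- inner loop of A over indices becomes a fold over the first k chars
    have hinner :
        (PySem.List.pyRange 0 ((k : Nat) : Int) 1).foldl (fun (s : Int × Int) j =>
          match (some row).bind (fun r => PySem.Str.pyGet? r j) with
          | some c =>
              if c = '.' then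
                let consecutive := s.2 + 1
                if consecutive = 2 then (s.1 + 1, consecutive) else (s.1, consecutive)
              else (s.1, 0)
          | none => s) (acc, 0)
        = (row.toList.take k).foldl pvStep (acc, 0) :=
      pvFoldl_pyRange_get row.toList k hrl
        (F := fun o (s : Int × Int) =>
          match o with
          | some c =>
              if c = '.' then
                let consecutive := s.2 + 1
                if consecutive = 2 then (s.1 + 1, consecutive) else (s.1, consecutive)
              else (s.1, 0)
          | none => s) (acc, 0)
    rw [hinner, pvFoldl_step_runs2]
    have hsl : (PySem.Str.slice row none (some ((k : Nat) : Int))).toList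
        = row.toList.take k := by
      simp [PySem.Str.slice, PySem.List.slice_to _ (by positivity : (0:Int) ≤ ((k : Nat) : Int))]
    simp only [hsl, pvRowCount (row.toList.take k)]
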